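-- pv_equiv track=rewrite | github.com/linhdvu14/cp-sols | sols/CodeForces/1750_d12_codeton/D_Count_GCD.py | solve
-- ===== SOURCE A (Python) =====
-- MOD = 998244353
--
-- def solve(N, M, A):
--     for i in range(1, N):
--         if A[i - 1] % A[i]:
--             return 0
--
--     res = 1
--     for i in range(1, N):
--         # count x in [1, M] s.t. gcd(x, A[i - 1]) = A[i]
--         # count x in [1, M // A[i]] s.t. gcd(x, A[i - 1] // A[i]) = 1
--         bound, n = M // A[i], A[i - 1] // A[i]
--
--         primes = []
--         p = 2
--         while p * p <= n:
--             if n % p == 0: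
--                 primes.append(p)
--                 while n % p == 0: n //= p
--             p += 1
--         if n > 1: primes.append(n)  # len(primes) <= 9
--
--         # inclusion exclusion
--         mult = bound
--         for mask in range(1, 1 << len(primes)):
--             div = 1
--             for i, p in enumerate(primes):
--                 if (mask >> i) & 1:
--                     div *= p
--             if bin(mask).count('1') % 2: mult -= bound // div
--             else: mult += bound // div
--
--         mult %= MOD
--         res = (res * mult) % MOD
--
--     return res
-- ===== SOURCE B (Python) =====
-- MOD = 998244353
--
-- def _phi(bound, n, p=2):
--     # Legendre-style recursion: #{x in [1, bound] : gcd(x, n) == 1}.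
--     # Find the next prime factor of n by trial division; strip it and recurse:
--     # numbers coprime to n = (those coprime to n/p^k) - (multiples of p among them).
--     # No prime list and no subset enumeration is ever materialized.
--     while p * p <= n:
--         if n % p == 0:
--             while n % p == 0:
--                 n //= p
--             return _phi(bound, n, p + 1) - _phi(bound // p, n, p + 1)
--         p += 1
--     if n > 1:
--         return bound - bound // n
--     return bound
--
-- def solve(N, M, A):
--     if any(A[i - 1] % A[i] for i in range(1, N)):
--         return 0
--     res = 1
--     for i in range(1, N):
--         # count x in [1, M // A[i]] coprime to A[i - 1] // A[i]
--         res = res * (_phi(M // A[i], A[i - 1] // A[i]) % MOD) % MOD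
--     return res
-- ===== Notes on version B (the rewrite author's own statement) =====
-- stated objective: alternative
-- what changed: A builds an explicit prime list and then runs a 2^k bitmask loop over subsets; B never materializes primes or subsets: a single Legendre-style recursive counter _phi interleaves trial division with the recursion phi(bound,n) = phi(bound,n/p^k) - phi(bound//p,n/p^k) on the smallest prime factor, and the guard loop becomes any().
import Mathlib
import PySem

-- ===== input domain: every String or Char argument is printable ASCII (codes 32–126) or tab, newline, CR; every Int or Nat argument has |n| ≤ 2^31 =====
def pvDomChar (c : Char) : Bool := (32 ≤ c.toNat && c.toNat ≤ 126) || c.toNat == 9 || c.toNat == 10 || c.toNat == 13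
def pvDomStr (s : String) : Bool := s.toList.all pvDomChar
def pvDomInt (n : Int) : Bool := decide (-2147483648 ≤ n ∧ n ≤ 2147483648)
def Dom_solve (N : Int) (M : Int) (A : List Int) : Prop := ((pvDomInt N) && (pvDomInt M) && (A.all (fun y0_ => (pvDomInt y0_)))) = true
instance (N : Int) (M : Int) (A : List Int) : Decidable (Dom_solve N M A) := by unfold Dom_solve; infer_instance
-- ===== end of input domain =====

-- B replaces A's prime-list factorization + 2^k bitmask inclusion-exclusion by a single
-- Legendre-style recursive coprime counter that interleaves trial division with the
-- recursion phi(b,n) = phi(b,n') - phi(b//p,n') on the smallest prime factor p of n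
-- (objective: alternative decomposition, no prime list or subset enumeration built).

-- ===== PORT A =====

def MOD : Int := 998244353

-- inner 'while n % p == 0: n //= p', structural recursion on a fuel bound on the
-- iteration count (each pass divides 0 < n by p ≥ 2, so n.toNat steps always suffice;
-- the extra 0 < n, 2 ≤ p tests only keep the step total and hold at every call site)
def pyStripGo : Nat → Int → Int → Int
  | 0, n, _ => n
  | fuel + 1, n, p =>
    if PySem.Int.mod n p = 0 ∧ 0 < n ∧ 2 ≤ p then pyStripGo fuel (PySem.Int.floordiv n p) p
    else n

def pyStrip (n : Int) (p : Int) : Int := pyStripGo n.toNat n p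

-- 'p = 2; while p*p <= n: ...' plus the trailing 'if n > 1: primes.append(n)';
-- p increases by 1 each pass and the loop runs while p*p ≤ n, so n.toNat + 1 fuel
-- always suffices; the 2 ≤ p test only keeps the step total (p starts at 2 and grows)
def factorGo : Nat → Int → Int → List Int → List Int
  | 0, _, n, acc => if 1 < n then acc ++ [n] else acc
  | fuel + 1, p, n, acc =>
    if 2 ≤ p ∧ p * p ≤ n then
      (if PySem.Int.mod n p = 0 then factorGo fuel (p + 1) (pyStrip n p) (acc ++ [p])
       else factorGo fuel (p + 1) n acc)
    else (if 1 < n then acc ++ [n] else acc)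

def primesOf (n : Int) : List Int := factorGo (n.toNat + 1) 2 n []

-- div = prod of primes[i] with bit i of mask set ('for i, p in enumerate(primes)':
-- zipIdx supplies the same (value, index) pairs with a Nat index)
def divOf (primes : List Int) (mask : Nat) : Int :=
  primes.zipIdx.foldl (fun d pi => if (mask >>> pi.2) &&& 1 ≠ 0 then d * pi.1 else d) 1

-- 'for mask in range(1, 1 << len(primes))': the masks are the naturals 1..2^k-1;
-- 'bin(mask).count('1')' is the population count of the (nonnegative) mask = PySem.Int.bitCount
def maskFold (primes : List Int) (bound : Int) : Int :=
  ((List.range (2 ^ primes.length)).drop 1).foldl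
    (fun mult (mask : Nat) =>
      if PySem.Int.bitCount (mask : Int) % 2 = 1 then
        mult - PySem.Int.floordiv bound (divOf primes mask)
      else mult + PySem.Int.floordiv bound (divOf primes mask)) bound

-- first loop: 'return 0' at the first nonzero A[i-1] % A[i]; the counter runs over
-- the (N-1).toNat = len(range(1, N)) loop iterations and exits early like the return
def guardGo (A : List Int) : Nat → Int → Bool
  | 0, _ => false
  | fuel + 1, i =>
    if PySem.Int.mod (PySem.List.pyGetD A (i - 1) 0) (PySem.List.pyGetD A i 0) != 0 then true
    else guardGo A fuel (i + 1)

def guardFail (N : Int) (A : List Int) : Bool := guardGo A (N - 1).toNat 1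

def solve (N : Int) (M : Int) (A : List Int) : Int :=
  if guardFail N A then 0
  else
    (PySem.List.pyRange 1 N).foldl (fun res i =>
      let ai := PySem.List.pyGetD A i 0
      let bound := PySem.Int.floordiv M ai
      let n := PySem.Int.floordiv (PySem.List.pyGetD A (i - 1) 0) ai
      let primes := primesOf n
      let mult := PySem.Int.mod (maskFold primes bound) MOD
      PySem.Int.mod (res * mult) MOD) 1

-- ===== PORT B =====

-- _phi(bound, n, p): the outer 'while p*p <= n' with its 'p += 1' becomes fuel
-- recursion; at a prime hit it strips p (same inner while as A's port) and returns
-- the difference of the two recursive calls. As in factorGo, p increases by 1 per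
-- step and n never grows, so n.toNat + 1 fuel always suffices; the 2 ≤ p test only
-- keeps the step total (p starts at 2 and grows).
def phiGo : Nat → Int → Int → Int → Int
  | 0, bound, n, _ => if 1 < n then bound - PySem.Int.floordiv bound n else bound
  | fuel + 1, bound, n, p =>
    if 2 ≤ p ∧ p * p ≤ n then
      (if PySem.Int.mod n p = 0 then
        phiGo fuel bound (pyStrip n p) (p + 1)
          - phiGo fuel (PySem.Int.floordiv bound p) (pyStrip n p) (p + 1)
       else phiGo fuel bound n (p + 1))
    else if 1 < n then bound - PySem.Int.floordiv bound n else bound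

def solve_alt (N : Int) (M : Int) (A : List Int) : Int :=
  if (PySem.List.pyRange 1 N).any (fun i =>
       PySem.Int.mod (PySem.List.pyGetD A (i - 1) 0) (PySem.List.pyGetD A i 0) != 0) then 0
  else
    (PySem.List.pyRange 1 N).foldl (fun res i =>
      let ai := PySem.List.pyGetD A i 0
      let n := PySem.Int.floordiv (PySem.List.pyGetD A (i - 1) 0) ai
      let mult := PySem.Int.mod (phiGo (n.toNat + 1) (PySem.Int.floordiv M ai) n 2) MOD
      PySem.Int.mod (res * mult) MOD) 1

-- ===== PRECONDITION & SPEC =====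

-- Pre_ excludes exactly the inputs on which A raises (IndexError when the loops reach an
-- index ≥ len(A), ZeroDivisionError when they reach a zero element) — i.e. it holds iff
-- every out-of-range-or-zero position in [1, N) is preceded by a nonzero remainder that
-- makes A return 0 first.  (Bad positions ≥ len(A)+2 are preceded by the bad position
-- len(A)+1, so bounding i by len(A)+2 loses nothing.)
def Pre_solve (N : Int) (M : Int) (A : List Int) : Prop :=
  ∀ i ∈ List.range (A.length + 2), 1 ≤ i → (i : Int) < N →
    (A.length ≤ i ∨ A.getD i 0 = 0) →
    ∃ j ∈ List.range i, 1 ≤ j ∧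
      PySem.Int.mod (A.getD (j - 1) 0) (A.getD j 0) ≠ 0
instance (N : Int) (M : Int) (A : List Int) : Decidable (Pre_solve N M A) := by
  unfold Pre_solve; infer_instance

def pvWitness_solve : Int × Int × List Int := (3, 10, [4, 2, 1])

def Spec_solve (N : Int) (M : Int) (A : List Int) (out : Int) : Prop := out = solve_alt N M A
instance (N : Int) (M : Int) (A : List Int) (out : Int) : Decidable (Spec_solve N M A out) := by
  unfold Spec_solve; infer_instance

-- ===== CLAIM (what is proved, stated in full; the proofs are below) =====
def Claim_equal_solve : Prop := ∀ (N : Int) (M : Int) (A : List Int), Dom_solve N M A → Pre_solve N M A → Spec_solve N M A (solve N M A)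

-- ===== LEMMAS AND PROOFS =====

-- the sign A attaches to a mask: -1 for odd popcount, +1 for even
def sgn (m : Nat) : Int := if PySem.Int.bitCount (m : Int) % 2 = 1 then -1 else 1

-- the signed squarefree-divisor table implicit in A's mask enumeration
def tabOf (ps : List Int) : List (Int × Int) :=
  ps.foldl (fun t q => t ++ t.map (fun ds => (ds.1 * q, -ds.2))) [((1:Int), (1:Int))]

-- the Legendre recursion of B's _phi, abstracted to the list of primes it peels
def F : List Int → Int → Int
  | [], b => b
  | q :: qs, b => F qs b - F qs (PySem.Int.floordiv b q)

theorem divOf_zero (ps : List Int) : divOf ps 0 = 1 := by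
  unfold divOf
  induction ps.zipIdx with
  | nil => rfl
  | cons x xs ih => simpa using ih

theorem bit_high (k m : Nat) (h : m < 2 ^ k) : ((2 ^ k + m) >>> k) &&& 1 = 1 := by
  rw [Nat.shiftRight_eq_div_pow, Nat.and_one_is_mod]
  have h1 : (2 ^ k * 1 + m) / 2 ^ k = 1 + m / 2 ^ k := Nat.mul_add_div (by positivity) 1 m
  have h2 : m / 2 ^ k = 0 := Nat.div_eq_of_lt h
  simp only [Nat.mul_one] at h1
  omega

theorem bit_low (k m i : Nat) (hi : i < k) (h : m < 2 ^ k) :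
    ((2 ^ k + m) >>> i) &&& 1 = (m >>> i) &&& 1 := by
  rw [Nat.shiftRight_eq_div_pow, Nat.shiftRight_eq_div_pow, Nat.and_one_is_mod, Nat.and_one_is_mod]
  obtain ⟨j, hj⟩ : ∃ j, k = i + (j + 1) := ⟨k - i - 1, by omega⟩
  subst hj
  have hpow : 2 ^ (i + (j + 1)) = 2 ^ i * (2 * 2 ^ j) := by ring
  rw [hpow]
  have h1 : (2 ^ i * (2 * 2 ^ j) + m) / 2 ^ i = 2 * 2 ^ j + m / 2 ^ i :=
    Nat.mul_add_div (by positivity) _ m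
  omega

theorem bit_over (k m : Nat) (h : m < 2 ^ k) : (m >>> k) &&& 1 = 0 := by
  rw [Nat.shiftRight_eq_div_pow, Nat.and_one_is_mod, Nat.div_eq_of_lt h]

theorem bitCount_pow_add (k m : Nat) (h : m < 2 ^ k) :
    PySem.Int.bitCount ((2 ^ k + m : Nat) : Int) = PySem.Int.bitCount ((m : Nat) : Int) + 1 := by
  induction k generalizing m with
  | zero =>
    interval_cases m
    decide
  | succ k ih =>
    rw [PySem.Int.bitCount_natCast (show 0 < 2 ^ (k + 1) + m by positivity)]
    have hpow : 2 ^ (k + 1) = 2 * 2 ^ k := by ring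
    have hdiv : (2 ^ (k + 1) + m) / 2 = 2 ^ k + m / 2 := by omega
    have hmod : (2 ^ (k + 1) + m) % 2 = m % 2 := by omega
    rw [hdiv, hmod, ih (m / 2) (by omega)]
    rcases Nat.eq_zero_or_pos m with hm | hm
    · subst hm; simp
    · rw [PySem.Int.bitCount_natCast hm]; omega

theorem sgn_pow_add (k m : Nat) (h : m < 2 ^ k) : sgn (2 ^ k + m) = -sgn m := by
  unfold sgn
  rw [bitCount_pow_add k m h]
  rcases Nat.even_or_odd (PySem.Int.bitCount ((m : Nat) : Int)) with he | ho
  · rw [Nat.even_iff] at he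
    rw [if_pos (by omega), if_neg (by omega)]
  · rw [Nat.odd_iff] at ho
    rw [if_neg (by omega), if_pos (by omega)]
    norm_num

theorem divOf_append_lt (ps : List Int) (p : Int) (m : Nat) (h : m < 2 ^ ps.length) :
    divOf (ps ++ [p]) m = divOf ps m := by
  unfold divOf
  rw [List.zipIdx_append, List.foldl_append]
  have hz : List.zipIdx [p] (0 + ps.length) = [(p, ps.length)] := by simp
  rw [hz, List.foldl_cons, List.foldl_nil]
  dsimp only
  have h0 := bit_over ps.length m h
  rw [if_neg (by omega)]

theorem divOf_append_add (ps : List Int) (p : Int) (m : Nat) (h : m < 2 ^ ps.length) :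
    divOf (ps ++ [p]) (2 ^ ps.length + m) = divOf ps m * p := by
  unfold divOf
  rw [List.zipIdx_append, List.foldl_append]
  have hcongr : ps.zipIdx.foldl
      (fun d pi => if ((2 ^ ps.length + m) >>> pi.2) &&& 1 ≠ 0 then d * pi.1 else d) 1 =
      ps.zipIdx.foldl (fun d pi => if (m >>> pi.2) &&& 1 ≠ 0 then d * pi.1 else d) 1 := by
    apply PySem.List.foldl_congr_mem
    intro acc x hx
    obtain ⟨-, hi, -⟩ := List.mem_zipIdx hx
    rw [bit_low ps.length m x.2 (by omega) h]
  rw [hcongr]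
  have hz : List.zipIdx [p] (0 + ps.length) = [(p, ps.length)] := by simp
  rw [hz, List.foldl_cons, List.foldl_nil]
  dsimp only
  have h1 := bit_high ps.length m h
  rw [if_pos (by omega)]

theorem tab_char (ps : List Int) :
    tabOf ps = (List.range (2 ^ ps.length)).map (fun m => (divOf ps m, sgn m)) := by
  induction ps using List.reverseRecOn with
  | nil => decide
  | append_singleton ps p ih =>
    unfold tabOf at ih ⊢
    rw [List.foldl_append, List.foldl_cons, List.foldl_nil, ih]
    have hl : (ps ++ [p]).length = ps.length + 1 := by simp
    have hp : 2 ^ (ps.length + 1) = 2 ^ ps.length + 2 ^ ps.length := by ring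
    rw [hl, hp, List.range_add, List.map_append, List.map_map, List.map_map]
    congr 1
    · apply List.map_congr_left
      intro m hm
      rw [List.mem_range] at hm
      dsimp only
      rw [divOf_append_lt ps p m hm]
    · apply List.map_congr_left
      intro m hm
      rw [List.mem_range] at hm
      dsimp only [Function.comp]
      rw [divOf_append_add ps p m hm, sgn_pow_add ps.length m hm]

theorem maskFold_eq_tab_sum (ps : List Int) (bound : Int) :
    maskFold ps bound = ((tabOf ps).map (fun ds => ds.2 * PySem.Int.floordiv bound ds.1)).sum := by
  rw [tab_char, List.map_map]
  unfold maskFold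
  obtain ⟨j, hj⟩ : ∃ j, 2 ^ ps.length = 1 + j :=
    ⟨2 ^ ps.length - 1, by have := Nat.two_pow_pos ps.length; omega⟩
  rw [hj, List.range_add, List.range_one]
  have hdrop : (([0] ++ (List.range j).map (fun x => 1 + x)).drop 1)
      = (List.range j).map (fun x => 1 + x) := rfl
  rw [hdrop]
  have hstep : (fun (mult : Int) (mask : Nat) =>
      if PySem.Int.bitCount (mask : Int) % 2 = 1 then
        mult - PySem.Int.floordiv bound (divOf ps mask)
      else mult + PySem.Int.floordiv bound (divOf ps mask)) =
      fun (mult : Int) (mask : Nat) => mult + sgn mask * PySem.Int.floordiv bound (divOf ps mask) := by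
    funext mult mask
    unfold sgn
    split_ifs <;> ring
  rw [hstep, PySem.List.foldl_add]
  have h0 : ((fun ds => ds.2 * PySem.Int.floordiv bound ds.1) ∘ (fun m => (divOf ps m, sgn m))) 0 = bound := by
    dsimp only [Function.comp]
    rw [divOf_zero]
    have hs : sgn 0 = 1 := by decide
    rw [hs, PySem.Int.floordiv_eq_ediv_of_pos (by omega), Int.ediv_one, one_mul]
  simp only [List.cons_append, List.nil_append] at *
  rw [show ((0 : Nat) :: (List.range j).map (fun x => 1 + x)) = [0] ++ (List.range j).map (fun x => 1 + x) from rfl]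
  rw [List.map_append, List.sum_append]
  simp only [List.map_cons, List.map_nil, List.sum_cons, List.sum_nil, h0]
  ring_nf
  rfl

-- one foldl step of tabOf, as an append
theorem tab_step (ps : List Int) (q : Int) :
    tabOf (ps ++ [q]) = tabOf ps ++ (tabOf ps).map (fun ds => (ds.1 * q, -ds.2)) := by
  unfold tabOf
  rw [List.foldl_append, List.foldl_cons, List.foldl_nil]

theorem tab_pos (ps : List Int) (hps : ∀ x ∈ ps, 2 ≤ x) :
    ∀ ds ∈ tabOf ps, 0 < ds.1 := by
  induction ps using List.reverseRecOn with
  | nil =>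
    intro ds hds
    have h : ds = ((1 : Int), (1 : Int)) := by simpa [tabOf] using hds
    rw [h]
    norm_num
  | append_singleton ps q ih =>
    intro ds hds
    have hq : 2 ≤ q := hps q (by simp)
    have hps' : ∀ x ∈ ps, 2 ≤ x := fun x hx => hps x (by simp [hx])
    rw [tab_step] at hds
    rcases List.mem_append.mp hds with h | h
    · exact ih hps' ds h
    · obtain ⟨es, hes, heq⟩ := List.mem_map.mp h
      have := ih hps' es hes
      subst heq
      positivity

-- two successive floor divisions by positive divisors commute (both are b // (p*q))
theorem floordiv_comm (b p q : Int) (hp : 0 < p) (hq : 0 < q) :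
    PySem.Int.floordiv (PySem.Int.floordiv b p) q
      = PySem.Int.floordiv (PySem.Int.floordiv b q) p := by
  rw [PySem.Int.floordiv_eq_ediv_of_pos hp, PySem.Int.floordiv_eq_ediv_of_pos hq,
      PySem.Int.floordiv_eq_ediv_of_pos hq, PySem.Int.floordiv_eq_ediv_of_pos hp,
      Int.ediv_ediv_of_nonneg (le_of_lt hp), Int.ediv_ediv_of_nonneg (le_of_lt hq),
      mul_comm]

theorem floordiv_floordiv (b p q : Int) (hp : 0 < p) (hq : 0 < q) :
    PySem.Int.floordiv b (p * q) = PySem.Int.floordiv (PySem.Int.floordiv b p) q := by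
  rw [PySem.Int.floordiv_eq_ediv_of_pos hp, PySem.Int.floordiv_eq_ediv_of_pos hq,
      PySem.Int.floordiv_eq_ediv_of_pos (by positivity),
      Int.ediv_ediv_of_nonneg (le_of_lt hp)]

theorem sum_map_neg_int {α : Type} (l : List α) (g : α → Int) :
    (l.map (fun x => -g x)).sum = -(l.map g).sum := by
  induction l with
  | nil => simp
  | cons x xs ih => simp [ih]; ring

theorem tab_sum_step (ps : List Int) (q : Int) (b : Int)
    (hps : ∀ x ∈ ps, 2 ≤ x) (hq : 2 ≤ q) :
    ((tabOf (ps ++ [q])).map (fun ds => ds.2 * PySem.Int.floordiv b ds.1)).sum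
      = ((tabOf ps).map (fun ds => ds.2 * PySem.Int.floordiv b ds.1)).sum
        - ((tabOf ps).map (fun ds => ds.2 *
            PySem.Int.floordiv (PySem.Int.floordiv b q) ds.1)).sum := by
  rw [tab_step, List.map_append, List.sum_append, List.map_map]
  have hmap : (tabOf ps).map
      ((fun ds => ds.2 * PySem.Int.floordiv b ds.1) ∘ (fun ds => (ds.1 * q, -ds.2)))
      = (tabOf ps).map (fun ds => -(ds.2 * PySem.Int.floordiv (PySem.Int.floordiv b q) ds.1)) := by
    apply List.map_congr_left
    intro ds hds
    have hd : 0 < ds.1 := tab_pos ps hps ds hds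
    dsimp only [Function.comp]
    rw [mul_comm ds.1 q, floordiv_floordiv b q ds.1 (by omega) hd]
    ring
  rw [hmap, sum_map_neg_int]
  ring

theorem F_append : ∀ (ps : List Int) (q b : Int), (∀ x ∈ ps, 2 ≤ x) → 2 ≤ q →
    F (ps ++ [q]) b = F ps b - F ps (PySem.Int.floordiv b q) := by
  intro ps
  induction ps with
  | nil => intro q b _ _; rfl
  | cons p ps ih =>
    intro q b hps hq
    have hp : 2 ≤ p := hps p (by simp)
    have hps' : ∀ x ∈ ps, 2 ≤ x := fun x hx => hps x (by simp [hx])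
    show F (ps ++ [q]) b - F (ps ++ [q]) (PySem.Int.floordiv b p) = _
    rw [ih q b hps' hq, ih q (PySem.Int.floordiv b p) hps' hq]
    show _ = (F ps b - F ps (PySem.Int.floordiv b p))
      - (F ps (PySem.Int.floordiv b q) - F ps (PySem.Int.floordiv (PySem.Int.floordiv b q) p))
    rw [floordiv_comm b p q (by omega) (by omega)]
    ring

theorem maskFold_eq_F (ps : List Int) (b : Int) (hps : ∀ x ∈ ps, 2 ≤ x) :
    maskFold ps b = F ps b := by
  induction ps using List.reverseRecOn generalizing b with
  | nil => rfl
  | append_singleton ps q ih =>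
    have hq : 2 ≤ q := hps q (by simp)
    have hps' : ∀ x ∈ ps, 2 ≤ x := fun x hx => hps x (by simp [hx])
    rw [maskFold_eq_tab_sum, tab_sum_step ps q b hps' hq,
        ← maskFold_eq_tab_sum, ← maskFold_eq_tab_sum,
        ih b hps', ih (PySem.Int.floordiv b q) hps', F_append ps q b hps' hq]

theorem factorGo_acc (fuel : Nat) :
    ∀ (p n : Int) (acc : List Int), factorGo fuel p n acc = acc ++ factorGo fuel p n [] := by
  induction fuel with
  | zero =>
    intro p n acc
    show (if 1 < n then acc ++ [n] else acc) = acc ++ (if 1 < n then [] ++ [n] else [])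
    split_ifs <;> simp
  | succ fuel ih =>
    intro p n acc
    show (if 2 ≤ p ∧ p * p ≤ n then _ else _) = acc ++ (if 2 ≤ p ∧ p * p ≤ n then _ else _)
    split_ifs with h1 h2 h3
    · rw [ih (p + 1) (pyStrip n p) (acc ++ [p]), ih (p + 1) (pyStrip n p) ([] ++ [p])]
      simp
    · exact ih (p + 1) n acc
    · simp
    · simp

theorem primes_ge (fuel : Nat) :
    ∀ (p n : Int) (acc : List Int), 2 ≤ p → (∀ x ∈ acc, 2 ≤ x) →
      ∀ x ∈ factorGo fuel p n acc, 2 ≤ x := by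
  induction fuel with
  | zero =>
    intro p n acc hp hacc x hx
    show 2 ≤ x
    by_cases hn : 1 < n
    · rw [show factorGo 0 p n acc = acc ++ [n] from by simp [factorGo, hn]] at hx
      rcases List.mem_append.mp hx with h | h
      · exact hacc x h
      · simp at h; omega
    · rw [show factorGo 0 p n acc = acc from by simp [factorGo, hn]] at hx
      exact hacc x hx
  | succ fuel ih =>
    intro p n acc hp hacc x hx
    by_cases h1 : 2 ≤ p ∧ p * p ≤ n
    · by_cases h2 : PySem.Int.mod n p = 0
      · rw [show factorGo (fuel + 1) p n acc
            = factorGo fuel (p + 1) (pyStrip n p) (acc ++ [p]) from by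
              simp [factorGo, h1, h2]] at hx
        refine ih (p + 1) (pyStrip n p) (acc ++ [p]) (by omega) ?_ x hx
        intro y hy
        rcases List.mem_append.mp hy with h | h
        · exact hacc y h
        · simp at h; omega
      · rw [show factorGo (fuel + 1) p n acc = factorGo fuel (p + 1) n acc from by
              simp [factorGo, h1, h2]] at hx
        exact ih (p + 1) n acc (by omega) hacc x hx
    · by_cases hn : 1 < n
      · rw [show factorGo (fuel + 1) p n acc = acc ++ [n] from by simp [factorGo, h1, hn]] at hx
        rcases List.mem_append.mp hx with h | h
        · exact hacc x h
        · simp at h; omega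
      · rw [show factorGo (fuel + 1) p n acc = acc from by simp [factorGo, h1, hn]] at hx
        exact hacc x hx

theorem phi_eq_F (fuel : Nat) :
    ∀ (b n p : Int), phiGo fuel b n p = F (factorGo fuel p n []) b := by
  induction fuel with
  | zero =>
    intro b n p
    show (if 1 < n then b - PySem.Int.floordiv b n else b)
      = F (if 1 < n then [] ++ [n] else []) b
    by_cases hn : 1 < n <;> simp only [hn, if_pos, if_false] <;> rfl
  | succ fuel ih =>
    intro b n p
    show (if 2 ≤ p ∧ p * p ≤ n then _ else _) = F (if 2 ≤ p ∧ p * p ≤ n then _ else _) b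
    by_cases h1 : 2 ≤ p ∧ p * p ≤ n
    · simp only [h1]
      by_cases h2 : PySem.Int.mod n p = 0
      · simp only [h2]
        rw [show ([] : List Int) ++ [p] = [p] from rfl,
            factorGo_acc fuel (p + 1) (pyStrip n p) [p]]
        show phiGo fuel b (pyStrip n p) (p + 1)
            - phiGo fuel (PySem.Int.floordiv b p) (pyStrip n p) (p + 1)
          = F (p :: factorGo fuel (p + 1) (pyStrip n p) []) b
        rw [ih b (pyStrip n p) (p + 1), ih (PySem.Int.floordiv b p) (pyStrip n p) (p + 1)]
        rfl
      · simp only [h2, if_false]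
        exact ih b n (p + 1)
    · simp only [h1, if_false]
      by_cases hn : 1 < n <;> simp only [hn, if_true, if_false] <;> rfl

-- A's early-exit guard loop computes the same Bool as B's any() over range(1, N)
theorem guardGo_any (A : List Int) (fuel : Nat) :
    ∀ (i : Int), guardGo A fuel i
      = (PySem.List.pyRange i (i + fuel) 1).any (fun j =>
          PySem.Int.mod (PySem.List.pyGetD A (j - 1) 0) (PySem.List.pyGetD A j 0) != 0) := by
  induction fuel with
  | zero =>
    intro i
    rw [show i + (0 : Nat) = i by omega, PySem.List.pyRange_one_eq_nil (le_refl i)]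
    rfl
  | succ fuel ih =>
    intro i
    rw [PySem.List.pyRange_one_cons (show i < i + (fuel + 1 : Nat) by omega)]
    show (if PySem.Int.mod (PySem.List.pyGetD A (i - 1) 0) (PySem.List.pyGetD A i 0) != 0
          then true else guardGo A fuel (i + 1)) = _
    rw [List.any_cons, ih (i + 1), show i + 1 + (fuel : Nat) = i + (fuel + 1 : Nat) by omega]
    cases PySem.Int.mod (PySem.List.pyGetD A (i - 1) 0) (PySem.List.pyGetD A i 0) != 0 <;> simp

theorem guard_eq (N : Int) (A : List Int) :
    guardFail N A = (PySem.List.pyRange 1 N).any (fun j =>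
      PySem.Int.mod (PySem.List.pyGetD A (j - 1) 0) (PySem.List.pyGetD A j 0) != 0) := by
  unfold guardFail
  rw [guardGo_any A (N - 1).toNat 1]
  by_cases hN : 1 ≤ N
  · rw [show (1 : Int) + ((N - 1).toNat : Int) = N by omega]
  · rw [PySem.List.pyRange_one_eq_nil (show N ≤ 1 by omega),
        PySem.List.pyRange_one_eq_nil (show (1 : Int) + ((N - 1).toNat : Int) ≤ 1 by omega)]

-- ===== VERDICT (by name: the statement is the Claim_ definition above) =====
theorem solve_spec : Claim_equal_solve := by
  intro N M A _ _
  unfold Spec_solve solve solve_alt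
  rw [← guard_eq]
  cases hg : guardFail N A with
  | true => rfl
  | false =>
    simp only [Bool.false_eq_true, if_false]
    congr 1
    funext res i
    dsimp only
    rw [maskFold_eq_F (primesOf (PySem.Int.floordiv (PySem.List.pyGetD A (i - 1) 0)
          (PySem.List.pyGetD A i 0)))
        (PySem.Int.floordiv M (PySem.List.pyGetD A i 0))
        (primes_ge _ 2 _ [] (by omega) (by intro x hx; simp at hx)),
      phi_eq_F]
    rfl
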